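-- pv_equiv track=rewrite | github.com/Anuvab-Chakraborty/My_DSA_Journey_PYTHON | CODEFORCES PROBLEMS IN PYTHON/1760D.py | solve
-- ===== SOURCE A (Python) =====
-- def solve(n,l):
--     flag=0
--     if n<=2:return "YES"
--     for i in range(n-1):
--         if l[i]==l[i+1]:pass
--         elif l[i+1]-l[i]>0:flag=1
--         elif l[i+1]-l[i]<0 and flag==1:return "NO"
--     return "YES"
-- ===== SOURCE B (Python) =====
-- def solve(n, l):
--     if n <= 2:
--         return "YES"
--     first_ascent = next((i for i in range(n - 1) if l[i + 1] > l[i]), None)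
--     last_descent = max((i for i in range(n - 1) if l[i + 1] < l[i]), default=-1)
--     return "NO" if first_ascent is not None and first_ascent < last_descent else "YES"
-- ===== Notes on version B (the rewrite author's own statement) =====
-- stated objective: alternative
-- what changed: Replaces the running-flag early-return scan with one pass computing the first ascent index and one pass computing the last descent index, answering NO iff the first ascent is strictly before the last descent.
-- outside the precondition, e.g. on solve(4, [1, 2, 1]): A returns 'NO', B raises IndexError
import Mathlib
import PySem

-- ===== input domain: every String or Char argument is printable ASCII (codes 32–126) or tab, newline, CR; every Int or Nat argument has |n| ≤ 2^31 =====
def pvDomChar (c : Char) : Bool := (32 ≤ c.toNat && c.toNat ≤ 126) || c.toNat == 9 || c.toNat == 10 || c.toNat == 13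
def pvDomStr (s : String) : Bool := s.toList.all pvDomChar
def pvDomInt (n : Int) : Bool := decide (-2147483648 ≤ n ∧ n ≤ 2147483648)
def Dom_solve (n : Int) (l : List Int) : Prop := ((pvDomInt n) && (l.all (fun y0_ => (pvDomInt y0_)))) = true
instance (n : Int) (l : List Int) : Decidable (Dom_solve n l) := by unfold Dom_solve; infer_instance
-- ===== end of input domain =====

-- B replaces A's running-flag early-return scan by two index-building passes (first ascent,
-- last descent) compared at the end; same O(n) cost, different decomposition (objective: alternative).

-- ===== PORT A =====
-- A's for-loop with early return "NO": recursion over the index list, carrying the flag;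
-- `some "NO"` models the early return, `none` means the loop fell through.
-- l[i] is pyGetD with default 0: exact on indices Pre_solve admits (0 ≤ i < len l).
def solveLoopA (l : List Int) : List Int → Int → Option String
  | [], _ => none
  | i :: rest, flag =>
    if PySem.List.pyGetD l i 0 == PySem.List.pyGetD l (i+1) 0 then solveLoopA l rest flag
    else if PySem.List.pyGetD l (i+1) 0 - PySem.List.pyGetD l i 0 > 0 then solveLoopA l rest 1
    else if PySem.List.pyGetD l (i+1) 0 - PySem.List.pyGetD l i 0 < 0 ∧ flag == 1 then some "NO"
    else solveLoopA l rest flag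

def solve (n : Int) (l : List Int) : String :=
  if n ≤ 2 then "YES"
  else
    match solveLoopA l (PySem.List.pyRange 0 (n - 1) 1) 0 with
    | some s => s
    | none => "YES"

-- ===== PORT B =====
-- the two generator conditions of Source B
def ascB (l : List Int) (i : Int) : Bool := decide (PySem.List.pyGetD l i 0 < PySem.List.pyGetD l (i+1) 0)
def descB (l : List Int) (i : Int) : Bool := decide (PySem.List.pyGetD l (i+1) 0 < PySem.List.pyGetD l i 0)

def solve_alt (n : Int) (l : List Int) : String :=
  if n ≤ 2 then "YES"
  else
    let idxs := PySem.List.pyRange 0 (n - 1) 1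
    let firstAscent := idxs.find? (ascB l)                              -- next((...), None)
    let lastDescent := (idxs.filter (descB l)).foldl max (-1)           -- max((...), default=-1)
    match firstAscent with
    | some i => if i < lastDescent then "NO" else "YES"
    | none => "YES"

-- ===== PRECONDITION & SPEC =====
-- Pre_ excludes n > 2 with n > len(l): there the loops index past the end of l — A raises
-- IndexError unless its early "NO" fires first (an accident of the scan order on malformed
-- input, since n is meant to be len(l)), and B always raises IndexError there.
def Pre_solve (n : Int) (l : List Int) : Prop := 2 < n → n ≤ (l.length : Int)
instance (n : Int) (l : List Int) : Decidable (Pre_solve n l) := by unfold Pre_solve; infer_instance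
def pvWitness_solve : Int × List Int := (4, [1, 3, 2, 2])
def Spec_solve (n : Int) (l : List Int) (out : String) : Prop := out = solve_alt n l
instance (n : Int) (l : List Int) (out : String) : Decidable (Spec_solve n l out) := by unfold Spec_solve; infer_instance

-- ===== CLAIM (what is proved, stated in full; the proofs are below) =====
def Claim_equal_solve : Prop := ∀ (n : Int) (l : List Int), Dom_solve n l → Pre_solve n l → Spec_solve n l (solve n l)

-- ===== LEMMAS AND PROOFS =====

-- A's decision, flag already 1: "NO" iff some remaining index is a descent.
theorem solveLoopA_flag1 (l : List Int) (is : List Int) :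
    solveLoopA l is 1 = if is.any (descB l) then some "NO" else none := by
  induction is with
  | nil => simp [solveLoopA]
  | cons i rest ih =>
    rcases lt_trichotomy (PySem.List.pyGetD l i 0) (PySem.List.pyGetD l (i+1) 0) with h | h | h
    · have h1 : (PySem.List.pyGetD l i 0 == PySem.List.pyGetD l (i+1) 0) = false := by simp; omega
      have hd : ¬ (PySem.List.pyGetD l (i+1) 0 < PySem.List.pyGetD l i 0) := by omega
      simp [solveLoopA, h1, descB, ih, h, hd]
    · have h1 : (PySem.List.pyGetD l i 0 == PySem.List.pyGetD l (i+1) 0) = true := by simp [h]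
      have hd : ¬ (PySem.List.pyGetD l (i+1) 0 < PySem.List.pyGetD l i 0) := by omega
      simp [solveLoopA, h1, descB, ih, hd]
    · have h1 : (PySem.List.pyGetD l i 0 == PySem.List.pyGetD l (i+1) 0) = false := by simp; omega
      have ha : ¬ (PySem.List.pyGetD l i 0 < PySem.List.pyGetD l (i+1) 0) := by omega
      simp [solveLoopA, h1, descB, h, ha]

-- A's decision from flag 0, mirrored as a pure recursion.
def nbB (l : List Int) : List Int → Bool
  | [] => false
  | i :: rest => if ascB l i then rest.any (descB l) else nbB l rest

theorem solveLoopA_flag0 (l : List Int) (is : List Int) :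
    solveLoopA l is 0 = if nbB l is then some "NO" else none := by
  induction is with
  | nil => simp [solveLoopA, nbB]
  | cons i rest ih =>
    rcases lt_trichotomy (PySem.List.pyGetD l i 0) (PySem.List.pyGetD l (i+1) 0) with h | h | h
    · have h1 : (PySem.List.pyGetD l i 0 == PySem.List.pyGetD l (i+1) 0) = false := by simp; omega
      simp [solveLoopA, nbB, h1, ascB, descB, h, solveLoopA_flag1]
    · have h1 : (PySem.List.pyGetD l i 0 == PySem.List.pyGetD l (i+1) 0) = true := by simp [h]
      have ha : ¬ (PySem.List.pyGetD l i 0 < PySem.List.pyGetD l (i+1) 0) := by omega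
      simp [solveLoopA, nbB, h1, ascB, ih, ha]
    · have h1 : (PySem.List.pyGetD l i 0 == PySem.List.pyGetD l (i+1) 0) = false := by simp; omega
      have ha : ¬ (PySem.List.pyGetD l i 0 < PySem.List.pyGetD l (i+1) 0) := by omega
      simp [solveLoopA, nbB, h1, ascB, ih, ha, h]

theorem lt_foldl_max (ds : List Int) (acc x : Int) :
    x < ds.foldl max acc ↔ (x < acc ∨ ∃ j ∈ ds, x < j) := by
  induction ds generalizing acc with
  | nil => simp
  | cons d rest ih =>
    simp only [List.foldl_cons, ih, List.mem_cons]
    constructor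
    · rintro (h | h)
      · rcases (by omega : x < acc ∨ x < d) with h' | h'
        · exact Or.inl h'
        · exact Or.inr ⟨d, Or.inl rfl, h'⟩
      · exact Or.inr (h.imp (fun j hj => ⟨Or.inr hj.1, hj.2⟩))
    · rintro (h | ⟨j, hj | hj, hx⟩)
      · exact Or.inl (by omega)
      · omega
      · exact Or.inr ⟨j, hj, hx⟩

-- Main: on a strictly increasing list of nonnegative indices, A's decision equals B's.
theorem nb_eq_dec (l : List Int) (is : List Int)
    (hp : is.Pairwise (· < ·)) (hn : ∀ j ∈ is, 0 ≤ j) :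
    nbB l is =
      (match is.find? (ascB l) with
       | some i => decide (i < (is.filter (descB l)).foldl max (-1))
       | none => false) := by
  induction is with
  | nil => simp [nbB]
  | cons i rest ih =>
    have h1 : ∀ j ∈ rest, i < j := fun j hj => (List.pairwise_cons.mp hp).1 j hj
    have hp' : rest.Pairwise (· < ·) := (List.pairwise_cons.mp hp).2
    have hn' : ∀ j ∈ rest, 0 ≤ j := fun j hj => hn j (List.mem_cons_of_mem i hj)
    have hi0 : (0:Int) ≤ i := hn i (List.mem_cons_self)
    by_cases hA : ascB l i = true
    · have hD : descB l i = false := by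
        simp only [ascB, descB, decide_eq_true_eq] at hA ⊢
        simp; omega
      rw [List.find?_cons_of_pos hA]
      simp only [nbB, hA, if_true, List.filter_cons, hD, Bool.false_eq_true, if_false]
      rw [Bool.eq_iff_iff]
      simp only [List.any_eq_true, decide_eq_true_eq, lt_foldl_max, List.mem_filter]
      constructor
      · rintro ⟨j, hj, hd⟩
        exact Or.inr ⟨j, ⟨hj, hd⟩, h1 j hj⟩
      · rintro (h | ⟨j, ⟨hj, hd⟩, _⟩)
        · omega
        · exact ⟨j, hj, hd⟩
    · rw [List.find?_cons_of_neg hA]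
      simp only [nbB, hA, Bool.false_eq_true, if_false, ih hp' hn']
      cases hf : rest.find? (ascB l) with
      | none => simp
      | some i' =>
        have hi' : i' ∈ rest := List.mem_of_find?_eq_some hf
        have hii' : i < i' := h1 i' hi'
        have hi'0 : (0:Int) ≤ i' := hn' i' hi'
        simp only [List.filter_cons]
        by_cases hD : descB l i = true
        · simp only [hD, if_true]
          rw [Bool.eq_iff_iff]
          simp only [decide_eq_true_eq, lt_foldl_max, List.mem_cons]
          constructor
          · rintro (h | ⟨j, hj, hx⟩)
            · omega
            · exact Or.inr ⟨j, Or.inr hj, hx⟩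
          · rintro (h | ⟨j, hj | hj, hx⟩)
            · omega
            · omega
            · exact Or.inr ⟨j, hj, hx⟩
        · simp [hD]

-- ===== VERDICT (by name: the statement is the Claim_ definition above) =====
theorem solve_spec : Claim_equal_solve := by
  intro n l _ hpre
  unfold Spec_solve solve solve_alt
  by_cases h2 : n ≤ 2
  · simp [h2]
  · simp only [h2, if_false]
    rw [solveLoopA_flag0]
    rw [nb_eq_dec l _ (PySem.List.pairwise_lt_pyRange_one 0 (n-1))
      (fun j hj => (PySem.List.mem_pyRange_one.mp hj).1)]
    cases hf : (PySem.List.pyRange 0 (n-1) 1).find? (ascB l) with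
    | none => simp
    | some i =>
      by_cases hlt : i < ((PySem.List.pyRange 0 (n-1) 1).filter (descB l)).foldl max (-1) <;>
        simp [hlt]
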